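-- pv_equiv track=rewrite | github.com/daos-stack/daos | utils/githooks/pre-commit.d/80-build.config.py | process_build_config
-- ===== SOURCE A (Python) =====
-- def process_build_config(lines):
--     """Parse, sort, and normalize the build config lines."""
--     global_lines = []
--     sections = []
--     current_section = None
--
--     for line in lines:
--         stripped = line.strip()
--         if stripped.startswith('[') and stripped.endswith(']'):
--             new_section = stripped[1:-1]
--             current_section = {'name': new_section, 'header': line, 'lines': []}
--             sections.append(current_section)
--         elif current_section is None:
--             global_lines.append(line)
--         else:
--             current_section['lines'].append(line)
--
--     def get_units(lines):
--         units = []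
--         current_comments = []
--         for line in lines:
--             stripped = line.strip()
--             if not stripped:
--                 continue
--             if stripped.startswith(('#', ';')):
--                 current_comments.append(line)
--             elif '=' in stripped:
--                 key, val = line.split('=', 1)
--                 units.append({
--                     'comments': current_comments,
--                     'key': key.strip().lower(),
--                     'val': val.strip()
--                 })
--                 current_comments = []
--             else:
--                 current_comments.append(line)
--         if current_comments:
--             units.append({
--                 'comments': current_comments,
--                 'key': None,
--                 'val': None
--             })
--         return units
--
--     def format_unit(unit):
--         res = []
--         res.extend(unit['comments'])
--         if unit['key'] is not None:
--             res.append(f"{unit['key']}={unit['val']}\n")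
--         return res
--
--     def format_section(sec):
--         res = []
--         res.append(sec['header'])
--         units = get_units(sec['lines'])
--         key_units = sorted([u for u in units if u['key'] is not None],
--                            key=lambda x: x['key'])
--         other_units = [u for u in units if u['key'] is None]
--         for u in key_units:
--             res.extend(format_unit(u))
--         for u in other_units:
--             res.extend(format_unit(u))
--         return res
--
--     new_content = []
--     global_filtered = [line for line in global_lines if line.strip()]
--     new_content.extend(global_filtered)
--
--     for i, sec in enumerate(sections):
--         if i > 0:
--             new_content.append("\n")
--         new_content.extend(format_section(sec))
--
--     return new_content
-- ===== SOURCE B (Python) =====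
-- def process_build_config(lines):
--     """Parse, sort, and normalize the build config lines (single linear pass)."""
--     out = []            # global non-blank lines go here directly
--     sections = []       # each: [header, key_units as (key, formatted chunk), pending comments]
--     for line in lines:
--         stripped = line.strip()
--         if stripped.startswith('[') and stripped.endswith(']'):
--             sections.append([line, [], []])
--         elif not sections:
--             if stripped:
--                 out.append(line)
--         elif stripped:
--             sec = sections[-1]
--             if stripped[0] in '#;':
--                 sec[2].append(line)
--             elif '=' in stripped:
--                 key, val = line.split('=', 1)
--                 k = key.strip().lower()
--                 sec[1].append((k, sec[2] + [k + '=' + val.strip() + '\n']))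
--                 sec[2] = []
--             else:
--                 sec[2].append(line)
--     for i, (header, units, pending) in enumerate(sections):
--         if i:
--             out.append('\n')
--         out.append(header)
--         units.sort(key=lambda u: u[0])
--         for _, chunk in units:
--             out.extend(chunk)
--         out.extend(pending)
--     return out
-- ===== Notes on version B (the rewrite author's own statement) =====
-- stated objective: alternative
-- what changed: A buffers raw lines per section and re-parses each section afterwards (get_units) before sorting/formatting; B is a single linear pass that parses, normalizes and groups key-units (with their attached comments) on the fly, threading a pending-comment buffer per section, and only sorts each section's pre-formatted units at emission time.
import Mathlib
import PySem

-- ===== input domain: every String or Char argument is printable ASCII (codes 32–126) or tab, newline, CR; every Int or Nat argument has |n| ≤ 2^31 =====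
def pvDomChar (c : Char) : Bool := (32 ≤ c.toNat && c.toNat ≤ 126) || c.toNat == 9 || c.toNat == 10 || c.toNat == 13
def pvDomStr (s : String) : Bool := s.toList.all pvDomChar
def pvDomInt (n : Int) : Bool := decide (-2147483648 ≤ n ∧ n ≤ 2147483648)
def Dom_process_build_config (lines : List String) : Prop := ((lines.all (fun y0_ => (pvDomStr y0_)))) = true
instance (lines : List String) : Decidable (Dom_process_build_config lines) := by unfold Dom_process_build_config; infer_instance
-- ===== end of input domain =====

-- B replaces A's buffer-then-reparse structure (collect raw lines per section, then get_units + sort per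
-- section) by ONE linear pass that parses and formats key-units on the fly; objective: alternative
-- decomposition, same asymptotic cost.

-- ===== PORT A =====
-- unit = (comments, key, val) as in A's dicts; the body of A's get_units loop
def pbcUnitsStep (st : List (List String × Option String × Option String) × List String)
    (line : String) : List (List String × Option String × Option String) × List String :=
  let stripped := PySem.Str.strip line
  if stripped == "" then st
  else if PySem.Str.startswith stripped "#" || PySem.Str.startswith stripped ";" then
    (st.1, st.2 ++ [line])
  else if PySem.Str.isIn "=" stripped then
    -- key, val = line.split('=', 1): under the guard '=' ∈ line, so exactly two parts
    let parts := (PySem.Str.splitMax? line "=" 1).getD []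
    (st.1 ++ [(st.2, some (PySem.Str.lower (PySem.Str.strip (parts.getD 0 ""))),
               some (PySem.Str.strip (parts.getD 1 "")))], [])
  else (st.1, st.2 ++ [line])

def pbcGetUnits (ls : List String) : List (List String × Option String × Option String) :=
  let st := ls.foldl pbcUnitsStep ([], [])
  if st.2 == [] then st.1 else st.1 ++ [(st.2, (none : Option String), (none : Option String))]

def pbcFormatUnit (u : List String × Option String × Option String) : List String :=
  match u.2.1 with
  | some k => u.1 ++ [k ++ "=" ++ u.2.2.getD "" ++ "\n"]
  | none => u.1

-- sec = (name, header, lines); Python sorts key_units by u['key'] (a string there: every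
-- filtered unit's key is 'some', so the sort key 'u.2.1.getD ""' is exact)
def pbcFormatSection (sec : String × String × List String) : List String :=
  let units := pbcGetUnits sec.2.2
  let keyUnits := PySem.List.sorted (units.filter (fun u => u.2.1.isSome)) (fun u => u.2.1.getD "") false
  let otherUnits := units.filter (fun u => !u.2.1.isSome)
  otherUnits.foldl (fun acc u => acc ++ pbcFormatUnit u)
    (keyUnits.foldl (fun acc u => acc ++ pbcFormatUnit u) [sec.2.1])

-- current_section['lines'].append(line): A mutates the LAST section (current_section is None iff no
-- section was appended yet, so the match on the section list below is exact)
def pbcAppendLast : List (String × String × List String) → String → List (String × String × List String)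
  | [], _ => []
  | [(n, h, ls)], line => [(n, h, ls ++ [line])]
  | s :: rest, line => s :: pbcAppendLast rest line

def pbcPhase1Step (st : List String × List (String × String × List String)) (line : String) :
    List String × List (String × String × List String) :=
  let stripped := PySem.Str.strip line
  if PySem.Str.startswith stripped "[" && PySem.Str.endswith stripped "]" then
    (st.1, st.2 ++ [(PySem.Str.slice stripped (some 1) (some (-1)), line, ([] : List String))])
  else match st.2 with
    | [] => (st.1 ++ [line], st.2)
    | _ :: _ => (st.1, pbcAppendLast st.2 line)

def process_build_config (lines : List String) : List String :=
  let st := lines.foldl pbcPhase1Step ([], [])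
  let globalFiltered := st.1.filter (fun l => !(PySem.Str.strip l == ""))
  (PySem.List.enumerate st.2).foldl
    (fun acc p => (if 0 < p.1 then acc ++ ["\n"] else acc) ++ pbcFormatSection p.2) globalFiltered

-- ===== PORT B =====
-- B's section record: (header, key-units as (key, formatted chunk), pending comments);
-- B mutates the last section in place
def pbcAltLastComment : List (String × List (String × List String) × List String) → String →
    List (String × List (String × List String) × List String)
  | [], _ => []
  | [(h, us, pend)], line => [(h, us, pend ++ [line])]
  | s :: rest, line => s :: pbcAltLastComment rest line

def pbcAltLastKey : List (String × List (String × List String) × List String) → String →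
    List (String × List (String × List String) × List String)
  | [], _ => []
  | [(h, us, pend)], line =>
      let parts := (PySem.Str.splitMax? line "=" 1).getD []
      let k := PySem.Str.lower (PySem.Str.strip (parts.getD 0 ""))
      [(h, us ++ [(k, pend ++ [k ++ "=" ++ PySem.Str.strip (parts.getD 1 "") ++ "\n"])], [])]
  | s :: rest, line => s :: pbcAltLastKey rest line

-- stripped[0] in '#;' : under the guard stripped ≠ "", s[0] is the head character
def pbcAltStep (st : List String × List (String × List (String × List String) × List String))
    (line : String) : List String × List (String × List (String × List String) × List String) :=
  let stripped := PySem.Str.strip line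
  if PySem.Str.startswith stripped "[" && PySem.Str.endswith stripped "]" then
    (st.1, st.2 ++ [(line, ([] : List (String × List String)), ([] : List String))])
  else match st.2 with
    | [] => if stripped == "" then st else (st.1 ++ [line], st.2)
    | _ :: _ =>
      if stripped == "" then st
      else if stripped.toList.head?.elim false (fun c => "#;".toList.contains c) then
        (st.1, pbcAltLastComment st.2 line)
      else if PySem.Str.isIn "=" stripped then (st.1, pbcAltLastKey st.2 line)
      else (st.1, pbcAltLastComment st.2 line)

def process_build_config_alt (lines : List String) : List String :=
  let st := lines.foldl pbcAltStep (([] : List String), [])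
  (PySem.List.enumerate st.2).foldl
    (fun acc p =>
      ((PySem.List.sorted p.2.2.1 (fun u => u.1) false).foldl (fun a u => a ++ u.2)
        ((if 0 < p.1 then acc ++ ["\n"] else acc) ++ [p.2.1])) ++ p.2.2.2)
    st.1

-- ===== PRECONDITION & SPEC =====
def Spec_process_build_config (lines : List String) (out : List String) : Prop := out = process_build_config_alt lines
instance (lines : List String) (out : List String) : Decidable (Spec_process_build_config lines out) := by unfold Spec_process_build_config; infer_instance

-- ===== CLAIM (what is proved, stated in full; the proofs are below) =====
def Claim_equal_process_build_config : Prop := ∀ (lines : List String), Dom_process_build_config lines → Spec_process_build_config lines (process_build_config lines)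

-- ===== LEMMAS AND PROOFS =====

-- B's per-section unit step, extracted from pbcAltStep for the proof
def pbcBStep (st : List (String × List String) × List String) (line : String) :
    List (String × List String) × List String :=
  let stripped := PySem.Str.strip line
  if stripped == "" then st
  else if stripped.toList.head?.elim false (fun c => "#;".toList.contains c) then
    (st.1, st.2 ++ [line])
  else if PySem.Str.isIn "=" stripped then
    let parts := (PySem.Str.splitMax? line "=" 1).getD []
    let k := PySem.Str.lower (PySem.Str.strip (parts.getD 0 ""))
    (st.1 ++ [(k, st.2 ++ [k ++ "=" ++ PySem.Str.strip (parts.getD 1 "") ++ "\n"])], [])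
  else (st.1, st.2 ++ [line])

-- an A-unit with a key, seen through B's eyes: (key, comments ++ [formatted key line])
def pbcGUnit (u : List String × Option String × Option String) : String × List String :=
  (u.2.1.getD "", u.1 ++ [u.2.1.getD "" ++ "=" ++ u.2.2.getD "" ++ "\n"])

-- an A-section, seen through B's eyes
def pbcSecMap (s : String × String × List String) :
    String × List (String × List String) × List String :=
  (s.2.1, s.2.2.foldl pbcBStep ([], []))

-- the two comment tests agree on a nonempty stripped line
lemma pbc_comment_eq (s : String) (h : s.toList ≠ []) :
    (PySem.Str.startswith s "#" || PySem.Str.startswith s ";")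
      = s.toList.head?.elim false (fun c => "#;".toList.contains c) := by
  cases hs : s.toList with
  | nil => exact absurd hs h
  | cons c cs =>
    simp [PySem.Str.startswith, PySem.Chars.startswith, hs, List.isPrefixOf]
    by_cases h1 : c = '#'
    · simp [h1]
    · by_cases h2 : c = ';'
      · simp [h2]
      · simp [h1, h2, Ne.symm h1, Ne.symm h2]

lemma pbc_step_rel (aus : List (List String × Option String × Option String))
    (cc : List String) (l : String) :
    pbcBStep (aus.map pbcGUnit, cc) l
      = ((pbcUnitsStep (aus, cc) l).1.map pbcGUnit, (pbcUnitsStep (aus, cc) l).2) := by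
  unfold pbcBStep pbcUnitsStep
  by_cases he : PySem.Str.strip l == ""
  · simp [he]
  · have hne : (PySem.Str.strip l).toList ≠ [] := by
      intro hnil
      apply he
      rw [String.toList_eq_nil_iff.mp hnil]
      rfl
    have hcomm := pbc_comment_eq (PySem.Str.strip l) hne
    simp only []
    rw [← hcomm]
    by_cases hc : (PySem.Str.startswith (PySem.Str.strip l) "#" || PySem.Str.startswith (PySem.Str.strip l) ";") = true <;>
      by_cases heq : PySem.Str.isIn "=" (PySem.Str.strip l) <;>
      simp at hc heq <;>
      simp [he, hc, heq, pbcGUnit]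

lemma pbc_units_rel (ls : List String) : ∀ (aus : List (List String × Option String × Option String))
    (cc : List String), (∀ u ∈ aus, u.2.1.isSome) →
    ls.foldl pbcBStep (aus.map pbcGUnit, cc)
      = ((ls.foldl pbcUnitsStep (aus, cc)).1.map pbcGUnit, (ls.foldl pbcUnitsStep (aus, cc)).2)
    ∧ ∀ u ∈ (ls.foldl pbcUnitsStep (aus, cc)).1, u.2.1.isSome := by
  induction ls with
  | nil => intro aus cc hall; exact ⟨rfl, hall⟩
  | cons l t ih =>
    intro aus cc hall
    have hstep := pbc_step_rel aus cc l
    have hall' : ∀ u ∈ (pbcUnitsStep (aus, cc) l).1, u.2.1.isSome := by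
      unfold pbcUnitsStep
      by_cases he : PySem.Str.strip l == "" <;>
        by_cases hc : (PySem.Str.startswith (PySem.Str.strip l) "#" || PySem.Str.startswith (PySem.Str.strip l) ";") = true <;>
        by_cases heq : PySem.Str.isIn "=" (PySem.Str.strip l) <;>
        (try simp at hc) <;> (try simp at heq) <;>
        simp [he, hc, heq] <;>
        (intro a a1 b h;
         first
           | exact hall (a, a1, b) h
           | (cases h with
              | inl h => exact hall (a, a1, b) h
              | inr h => simp [h.2.1]))
    have := ih (pbcUnitsStep (aus, cc) l).1 (pbcUnitsStep (aus, cc) l).2 hall'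
    simpa [List.foldl_cons, hstep] using this

lemma pbc_insertBy_map {α β : Type} (g : α → β) (b1 : β → β → Bool) (b2 : α → α → Bool)
    (hb : ∀ x y, b1 (g x) (g y) = b2 x y) (x : α) (ys : List α) :
    PySem.List.insertBy b1 (g x) (ys.map g) = (PySem.List.insertBy b2 x ys).map g := by
  induction ys with
  | nil => simp [PySem.List.insertBy]
  | cons y t ih =>
    simp only [List.map_cons, PySem.List.insertBy, hb]
    by_cases h : b2 x y <;> simp [h, ih]

-- the stable sort commutes with a key-preserving map
lemma pbc_sorted_map {α β : Type} (g : α → β) (ka : α → String) (kb : β → String)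
    (hk : ∀ x, kb (g x) = ka x) (l : List α) :
    PySem.List.sorted (l.map g) kb false = (PySem.List.sorted l ka false).map g := by
  rw [PySem.List.sorted_eq_foldl_insertBy, PySem.List.sorted_eq_foldl_insertBy, List.foldl_map]
  suffices h : ∀ acc : List α,
      l.foldl (fun acc x => PySem.List.insertBy (fun a b => decide (kb a < kb b)) (g x) acc) (acc.map g)
        = (l.foldl (fun acc x => PySem.List.insertBy (fun a b => decide (ka a < ka b)) x acc) acc).map g by
    simpa using h []
  induction l with
  | nil => intro acc; simp
  | cons x t ih =>
    intro acc
    simp only [List.foldl_cons]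
    rw [pbc_insertBy_map g (fun a b => decide (kb a < kb b)) (fun a b => decide (ka a < ka b)) (fun a b => by simp [hk]) x acc]
    exact ih _

lemma pbc_format_unit_some (u : List String × Option String × Option String)
    (h : u.2.1.isSome) : pbcFormatUnit u = (pbcGUnit u).2 := by
  obtain ⟨c, k?, v?⟩ := u
  obtain ⟨k, rfl⟩ := Option.isSome_iff_exists.mp h
  simp [pbcFormatUnit, pbcGUnit]

-- per-section agreement: A's format_section in terms of B's section record
lemma pbc_format_sec (sec : String × String × List String) :
    pbcFormatSection sec
      = [sec.2.1] ++ (PySem.List.sorted (pbcSecMap sec).2.1 (fun u => u.1) false).flatMap (fun u => u.2)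
          ++ (pbcSecMap sec).2.2 := by
  have h := pbc_units_rel sec.2.2 [] [] (by simp)
  obtain ⟨h1, h2⟩ := h
  simp only [List.map_nil] at h1
  unfold pbcFormatSection pbcGetUnits pbcSecMap
  rw [h1]
  set A := sec.2.2.foldl pbcUnitsStep ([], []) with hA
  have hfilt : (if A.2 == [] then A.1 else A.1 ++ [(A.2, (none : Option String), (none : Option String))]).filter (fun u => u.2.1.isSome) = A.1 := by
    have : A.1.filter (fun u => u.2.1.isSome) = A.1 := List.filter_eq_self.mpr h2
    by_cases hcc : A.2 == [] <;> simp [hcc, List.filter_append, this]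
  have hsort : PySem.List.sorted (A.1.map pbcGUnit) (fun u => u.1) false
      = (PySem.List.sorted A.1 (fun u => u.2.1.getD "") false).map pbcGUnit :=
    pbc_sorted_map pbcGUnit _ _ (fun x => rfl) A.1
  simp only [hfilt, hsort]
  have hkey : ∀ (init : List String),
      (PySem.List.sorted A.1 (fun u => u.2.1.getD "") false).foldl (fun acc u => acc ++ pbcFormatUnit u) init
        = ((PySem.List.sorted A.1 (fun u => u.2.1.getD "") false).map pbcGUnit).foldl (fun a u => a ++ u.2) init := by
    intro init
    rw [List.foldl_map]
    exact PySem.List.foldl_congr_mem _ _ _ init (fun acc u hu => by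
      rw [pbc_format_unit_some u (h2 u ((PySem.List.mem_sorted _ _ _ u).mp hu))])
  have hnone : A.1.filter (fun u => !u.2.1.isSome) = [] := by
    rw [List.filter_eq_nil_iff]
    intro u hu
    simp [h2 u hu]
  have hnone' : A.1.filter (fun u => u.2.1.isNone) = [] := by
    rw [List.filter_eq_nil_iff]
    intro u hu
    simp [Option.isNone_iff_eq_none]
    intro hn
    have := h2 u hu
    rw [hn] at this
    simp at this
  rw [hkey]
  by_cases hcc : A.2 == []
  · have hnil : A.2 = [] := by simpa using hcc
    simp only [hnil]
    rw [PySem.List.foldl_append_eq_flatMap]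
    simp [hnone', List.flatMap_def, List.map_map]
  · have hccf : (A.2 == []) = false := by simpa using hcc
    simp only [hccf, Bool.false_eq_true, if_false, List.filter_append, hnone, List.nil_append]
    simp only [List.filter_cons, List.filter_nil]
    rw [PySem.List.foldl_append_eq_flatMap]
    simp [List.flatMap_def, List.map_map, pbcFormatUnit]

-- updating the last section commutes with pbcSecMap, per classification of the line
lemma pbc_appendLast_skip (line : String) (hb : ∀ st, pbcBStep st line = st) :
    ∀ ss : List (String × String × List String),
    (pbcAppendLast ss line).map pbcSecMap = ss.map pbcSecMap := by
  intro ss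
  induction ss with
  | nil => rfl
  | cons s rest ih =>
    cases rest with
    | nil =>
      obtain ⟨n, h, ls⟩ := s
      simp [pbcAppendLast, pbcSecMap, List.foldl_append, hb]
    | cons s2 r2 => simp [pbcAppendLast, ih]

lemma pbc_appendLast_comment (line : String)
    (hb : ∀ st, pbcBStep st line = (st.1, st.2 ++ [line])) :
    ∀ ss : List (String × String × List String),
    (pbcAppendLast ss line).map pbcSecMap = pbcAltLastComment (ss.map pbcSecMap) line := by
  intro ss
  induction ss with
  | nil => rfl
  | cons s rest ih =>
    cases rest with
    | nil =>
      obtain ⟨n, h, ls⟩ := s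
      simp [pbcAppendLast, pbcAltLastComment, pbcSecMap, List.foldl_append, hb]
    | cons s2 r2 => simp [pbcAppendLast, pbcAltLastComment, ih]

lemma pbc_appendLast_key (line : String)
    (hb : ∀ st, pbcBStep st line
      = (st.1 ++ [(PySem.Str.lower (PySem.Str.strip (((PySem.Str.splitMax? line "=" 1).getD []).getD 0 "")),
          st.2 ++ [PySem.Str.lower (PySem.Str.strip (((PySem.Str.splitMax? line "=" 1).getD []).getD 0 ""))
            ++ "=" ++ PySem.Str.strip (((PySem.Str.splitMax? line "=" 1).getD []).getD 1 "") ++ "\n"])], [])) :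
    ∀ ss : List (String × String × List String),
    (pbcAppendLast ss line).map pbcSecMap = pbcAltLastKey (ss.map pbcSecMap) line := by
  intro ss
  induction ss with
  | nil => rfl
  | cons s rest ih =>
    cases rest with
    | nil =>
      obtain ⟨n, h, ls⟩ := s
      simp [pbcAppendLast, pbcAltLastKey, pbcSecMap, List.foldl_append, hb]
    | cons s2 r2 => simp [pbcAppendLast, pbcAltLastKey, ih]

-- the two phase-1 loop bodies preserve the state correspondence
lemma pbc_phase1_step (g : List String) (ss : List (String × String × List String)) (line : String) :
    pbcAltStep (g.filter (fun l => !(PySem.Str.strip l == "")), ss.map pbcSecMap) line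
      = ((pbcPhase1Step (g, ss) line).1.filter (fun l => !(PySem.Str.strip l == "")),
         (pbcPhase1Step (g, ss) line).2.map pbcSecMap) := by
  unfold pbcAltStep pbcPhase1Step
  by_cases hh : (PySem.Str.startswith (PySem.Str.strip line) "[" && PySem.Str.endswith (PySem.Str.strip line) "]") = true
  · simp only [hh, if_true]
    simp [pbcSecMap]
  · have hh' := eq_false_of_ne_true hh
    simp only [hh', Bool.false_eq_true, if_false]
    cases ss with
    | nil =>
      simp only [List.map_nil]
      by_cases he : (PySem.Str.strip line == "") = true
      · simp only [he, if_true]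
        simp [he]
      · have he' := eq_false_of_ne_true he
        simp only [he', Bool.false_eq_true, if_false]
        simp [List.filter_append, he']
    | cons s rest =>
      simp only [List.map_cons]
      by_cases he : (PySem.Str.strip line == "") = true
      · have hskip : ∀ st, pbcBStep st line = st := by
          intro st; unfold pbcBStep; simp only [he, if_true]
        have hmap := pbc_appendLast_skip line hskip (s :: rest)
        simp only [List.map_cons] at hmap
        simp only [he, if_true]
        simp [hmap]
      · have he' := eq_false_of_ne_true he
        have hne : (PySem.Str.strip line).toList ≠ [] := by
          intro hnil
          apply he
          rw [String.toList_eq_nil_iff.mp hnil]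
          rfl
        simp only [he', Bool.false_eq_true, if_false]
        by_cases hc : ((PySem.Str.strip line).toList.head?.elim false (fun c => "#;".toList.contains c)) = true
        · have hcomm : ∀ st, pbcBStep st line = (st.1, st.2 ++ [line]) := by
            intro st; unfold pbcBStep; simp only [he', Bool.false_eq_true, if_false, hc, if_true]
          have hmap := pbc_appendLast_comment line hcomm (s :: rest)
          simp only [List.map_cons] at hmap
          simp only [hc, if_true]
          simp [hmap]
        · have hc' := eq_false_of_ne_true hc
          simp only [hc', Bool.false_eq_true, if_false]
          by_cases heq : PySem.Str.isIn "=" (PySem.Str.strip line) = true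
          · have hkeyb : ∀ st, pbcBStep st line
                = (st.1 ++ [(PySem.Str.lower (PySem.Str.strip (((PySem.Str.splitMax? line "=" 1).getD []).getD 0 "")),
                    st.2 ++ [PySem.Str.lower (PySem.Str.strip (((PySem.Str.splitMax? line "=" 1).getD []).getD 0 ""))
                      ++ "=" ++ PySem.Str.strip (((PySem.Str.splitMax? line "=" 1).getD []).getD 1 "") ++ "\n"])], []) := by
              intro st
              unfold pbcBStep
              simp only [he', Bool.false_eq_true, if_false, hc', heq, if_true]
            have hmap := pbc_appendLast_key line hkeyb (s :: rest)
            simp only [List.map_cons] at hmap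
            simp only [heq, if_true]
            simp [hmap]
          · have heq' := eq_false_of_ne_true heq
            have hcomm : ∀ st, pbcBStep st line = (st.1, st.2 ++ [line]) := by
              intro st
              unfold pbcBStep
              simp only [he', Bool.false_eq_true, if_false, hc', heq', if_false]
            have hmap := pbc_appendLast_comment line hcomm (s :: rest)
            simp only [List.map_cons] at hmap
            simp only [heq', Bool.false_eq_true, if_false]
            simp [hmap]

set_option maxHeartbeats 1000000 in
lemma pbc_phase1_rel (lines : List String) :
    ∀ (g : List String) (ss : List (String × String × List String)),
    lines.foldl pbcAltStep (g.filter (fun l => !(PySem.Str.strip l == "")), ss.map pbcSecMap)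
      = ((lines.foldl pbcPhase1Step (g, ss)).1.filter (fun l => !(PySem.Str.strip l == "")),
         (lines.foldl pbcPhase1Step (g, ss)).2.map pbcSecMap) := by
  induction lines with
  | nil => intro g ss; rfl
  | cons l t ih =>
    intro g ss
    rw [List.foldl_cons, List.foldl_cons, pbc_phase1_step g ss l]
    exact ih (pbcPhase1Step (g, ss) l).1 (pbcPhase1Step (g, ss) l).2

-- the two emission loops agree
lemma pbc_emit (ss : List (String × String × List String)) :
    ∀ (s : Int) (acc : List String),
    (PySem.List.enumerate (ss.map pbcSecMap) s).foldl
      (fun acc p =>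
        ((PySem.List.sorted p.2.2.1 (fun u => u.1) false).foldl (fun a u => a ++ u.2)
          ((if 0 < p.1 then acc ++ ["\n"] else acc) ++ [p.2.1])) ++ p.2.2.2) acc
      = (PySem.List.enumerate ss s).foldl
          (fun acc p => (if 0 < p.1 then acc ++ ["\n"] else acc) ++ pbcFormatSection p.2) acc := by
  induction ss with
  | nil => intro s acc; rfl
  | cons sec rest ih =>
    intro s acc
    rw [List.map_cons, PySem.List.enumerate_cons, PySem.List.enumerate_cons, List.foldl_cons, List.foldl_cons]
    rw [ih]
    congr 1
    rw [pbc_format_sec sec, PySem.List.foldl_append_eq_flatMap]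
    simp [pbcSecMap]

-- ===== VERDICT (by name: the statement is the Claim_ definition above) =====
theorem process_build_config_spec : Claim_equal_process_build_config := by
  intro lines _
  unfold Spec_process_build_config process_build_config process_build_config_alt
  have h0 := pbc_phase1_rel lines [] []
  simp only [List.filter_nil, List.map_nil] at h0
  rw [h0]
  exact (pbc_emit (lines.foldl pbcPhase1Step ([], [])).2 0 _).symm
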